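-- pv_equiv track=rewrite | github.com/juakerjuan/arlapwm | gcode_generator.py | _find_segments
-- ===== SOURCE A (Python) =====
-- def _find_segments(row):
--     """Encontrar segmentos continuos en una fila"""
--     segments = []
--     start = None
--
--     for i, val in enumerate(row):
--         if val == 0 and start is None:  # Inicio de segmento negro
--             start = i
--         elif val == 255 and start is not None:  # Fin de segmento negro
--             segments.append((start, i))
--             start = None
--
--     # Si hay un segmento abierto al final
--     if start is not None:
--         segments.append((start, len(row)))
--
--     return segments
-- ===== SOURCE B (Python) =====
-- def _find_segments(row):
--     """Encontrar segmentos continuos en una fila (staged pipeline: filter, dedupe, pair)."""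
--     # 1. keep only the significant values 0 and 255, with their positions
--     ev = [(i, v) for i, v in enumerate(row) if v == 0 or v == 255]
--     # 2. drop 255s before the first 0 (they close nothing)
--     j = 0
--     while j < len(ev) and ev[j][1] == 255:
--         j += 1
--     ev = ev[j:]
--     # 3. collapse runs of equal values, keeping the first position of each run:
--     #    the result alternates 0,255,0,255,... so even slots open and odd slots close
--     keys = []
--     prev = None
--     for i, v in ev:
--         if v != prev:
--             keys.append(i)
--             prev = v
--     # 4. pair consecutive keys; a trailing unmatched open key closes at len(row)
--     return _pair(keys, len(row))
--
-- def _pair(keys, n):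
--     if not keys:
--         return []
--     if len(keys) == 1:
--         return [(keys[0], n)]
--     return [(keys[0], keys[1])] + _pair(keys[2:], n)
-- ===== Notes on version B (the rewrite author's own statement) =====
-- stated objective: alternative
-- what changed: Replaces A's single stateful pass (Optional start flag, conditional appends) by a staged pipeline: filter out everything but the significant values 0/255 with their positions, drop leading 255s, collapse runs of equal values keeping each run's first position, then pair up consecutive keys (trailing open key closes at len(row)).
import Mathlib
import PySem

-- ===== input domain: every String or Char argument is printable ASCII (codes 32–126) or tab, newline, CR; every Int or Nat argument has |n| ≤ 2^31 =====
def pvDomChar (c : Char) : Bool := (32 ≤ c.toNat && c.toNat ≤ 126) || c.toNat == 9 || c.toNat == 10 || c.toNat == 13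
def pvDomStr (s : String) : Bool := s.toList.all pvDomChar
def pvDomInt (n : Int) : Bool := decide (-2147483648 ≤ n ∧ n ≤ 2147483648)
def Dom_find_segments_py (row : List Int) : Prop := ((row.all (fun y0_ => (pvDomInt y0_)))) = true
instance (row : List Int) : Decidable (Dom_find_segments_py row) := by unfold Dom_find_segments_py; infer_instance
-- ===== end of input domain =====

-- B replaces A's single stateful pass by a staged pipeline — filter the significant
-- values, drop leading closers, collapse runs, zip-pair the keys (objective: alternative).

-- ===== PORT A =====
-- A's for-loop over enumerate(row) with state (segments, start), as structural recursion.
def aLoop : List Int → Int → List (Int × Int) → Option Int → List (Int × Int) × Option Int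
  | [], _, segs, start => (segs, start)
  | v :: rest, i, segs, start =>
    match start with
    | none => if v = 0 then aLoop rest (i + 1) segs (some i)
              else aLoop rest (i + 1) segs none
    | some s => if v = 255 then aLoop rest (i + 1) (segs ++ [(s, i)]) none
                else aLoop rest (i + 1) segs (some s)

def find_segments_py (row : List Int) : List (Int × Int) :=
  match aLoop row 0 [] none with
  | (segs, some s) => segs ++ [(s, (row.length : Int))]
  | (segs, none) => segs

-- ===== PORT B =====
-- step 3: collapse runs of equal values, keeping the first position of each run
def bCollapse : List (Int × Int) → Option Int → List Int
  | [], _ => []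
  | (i, v) :: r, prev => if some v ≠ prev then i :: bCollapse r (some v) else bCollapse r prev

-- step 4 (_pair in Source B): pair consecutive keys; a trailing open key closes at n
def bPair : List Int → Int → List (Int × Int)
  | [], _ => []
  | [a], n => [(a, n)]
  | a :: b :: rest, n => (a, b) :: bPair rest n

def find_segments_py_alt (row : List Int) : List (Int × Int) :=
  -- step 1: the comprehension over enumerate(row); step 2: the pop-front while-loop
  -- is dropWhile (value == 255)
  bPair
    (bCollapse
      (((PySem.List.enumerate row).filter (fun p => p.2 == 0 || p.2 == 255)).dropWhile
        (fun p => p.2 == 255))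
      none)
    (row.length : Int)

-- ===== PRECONDITION & SPEC =====
def Spec_find_segments_py (row : List Int) (out : List (Int × Int)) : Prop := out = find_segments_py_alt row
instance (row : List Int) (out : List (Int × Int)) : Decidable (Spec_find_segments_py row out) := by unfold Spec_find_segments_py; infer_instance

-- ===== CLAIM =====
def Claim_equal_find_segments_py : Prop := ∀ (row : List Int), Dom_find_segments_py row → Spec_find_segments_py row (find_segments_py row)

-- ===== LEMMAS AND PROOFS =====

-- Finishing step of A: append the still-open segment at total length n.
def aFinish (n : Int) (p : List (Int × Int) × Option Int) : List (Int × Int) :=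
  match p with
  | (segs, some s) => segs ++ [(s, n)]
  | (segs, none) => segs

-- Key-extraction recursions used only to bridge the two ports:
-- cC scans in the "closed" state for the next 0, cO in the "open" state for the next 255.
mutual
def cC : List Int → Int → List Int
  | [], _ => []
  | v :: rest, i => if v = 0 then i :: cO rest (i + 1) else cC rest (i + 1)

def cO : List Int → Int → List Int
  | [], _ => []
  | v :: rest, i => if v = 255 then i :: cC rest (i + 1) else cO rest (i + 1)
end

theorem aLoop_eq_keys (l : List Int) :
    (∀ (i : Int) (segs : List (Int × Int)) (n : Int),
        aFinish n (aLoop l i segs none) = segs ++ bPair (cC l i) n) ∧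
    (∀ (i : Int) (segs : List (Int × Int)) (s : Int) (n : Int),
        aFinish n (aLoop l i segs (some s)) = segs ++ bPair (s :: cO l i) n) := by
  induction l with
  | nil =>
    constructor
    · intro i segs n; simp [aLoop, aFinish, cC, bPair]
    · intro i segs s n; simp [aLoop, aFinish, cO, bPair]
  | cons v rest ih =>
    obtain ⟨ihC, ihO⟩ := ih
    constructor
    · intro i segs n
      by_cases h0 : v = 0
      · simp only [aLoop, cC, h0, if_true]
        rw [ihO (i + 1) segs i n]
      · simp only [aLoop, cC, if_neg h0]
        exact ihC (i + 1) segs n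
    · intro i segs s n
      by_cases h255 : v = 255
      · simp only [aLoop, cO, h255, if_true]
        rw [ihC (i + 1) (segs ++ [(s, i)]) n, List.append_assoc]
        rfl
      · simp only [aLoop, cO, if_neg h255]
        rw [ihO (i + 1) segs s n]

-- the filtered event list of B's step 1
def fev (l : List Int) (i : Int) : List (Int × Int) :=
  (PySem.List.enumerate l i).filter (fun p => p.2 == 0 || p.2 == 255)

theorem collapse_eq_keys (l : List Int) :
    (∀ (i : Int), bCollapse ((fev l i).dropWhile (fun p => p.2 == 255)) none = cC l i) ∧
    (∀ (i : Int), bCollapse (fev l i) (some 255) = cC l i) ∧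
    (∀ (i : Int), bCollapse (fev l i) (some 0) = cO l i) := by
  induction l with
  | nil => refine ⟨?_, ?_, ?_⟩ <;> intro i <;> simp [fev, PySem.List.enumerate_nil, bCollapse, cC, cO]
  | cons v rest ih =>
    obtain ⟨ihD, ihC, ihO⟩ := ih
    have hf : ∀ i : Int, fev (v :: rest) i =
        if v == 0 || v == 255 then (i, v) :: fev rest (i + 1) else fev rest (i + 1) := by
      intro i
      simp only [fev, PySem.List.enumerate_cons, List.filter_cons]
    refine ⟨?_, ?_, ?_⟩ <;> intro i
    · by_cases h0 : v = 0
      · subst h0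
        simp only [hf]
        simp [bCollapse, cC, ihO (i + 1)]
      · by_cases h255 : v = 255
        · subst h255
          simp only [hf]
          simpa [List.dropWhile, cC] using ihD (i + 1)
        · simp only [hf]
          rw [if_neg (by simp [h0, h255])]
          simpa [cC, h0] using ihD (i + 1)
    · by_cases h0 : v = 0
      · subst h0
        simp only [hf]
        simp [bCollapse, cC, ihO (i + 1)]
      · by_cases h255 : v = 255
        · subst h255
          simp only [hf]
          simpa [bCollapse, cC] using ihC (i + 1)
        · simp only [hf]
          rw [if_neg (by simp [h0, h255])]
          simpa [cC, h0] using ihC (i + 1)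
    · by_cases h255 : v = 255
      · subst h255
        simp only [hf]
        simp [bCollapse, cO, ihC (i + 1)]
      · by_cases h0 : v = 0
        · subst h0
          simp only [hf]
          simpa [bCollapse, cO] using ihO (i + 1)
        · simp only [hf]
          rw [if_neg (by simp [h0, h255])]
          simpa [cO, h255] using ihO (i + 1)

-- ===== VERDICT =====
theorem find_segments_py_spec : Claim_equal_find_segments_py := by
  intro row _
  unfold Spec_find_segments_py find_segments_py find_segments_py_alt
  have hA := (aLoop_eq_keys row).1 0 [] (row.length : Int)
  have hB := (collapse_eq_keys row).1 0
  simp only [List.nil_append] at hA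
  rw [show (((PySem.List.enumerate row).filter (fun p => p.2 == 0 || p.2 == 255)).dropWhile
        (fun p => p.2 == 255)) = (fev row 0).dropWhile (fun p => p.2 == 255) from rfl, hB, ← hA]
  unfold aFinish
  rcases aLoop row 0 [] none with ⟨segs, _ | s⟩ <;> rfl
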